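-- pv_equiv track=rewrite | github.com/GareBear99/Harvest | ml/seed_versioning.py | get_parameter_version
-- ===== SOURCE A (Python) =====
-- from typing import Dict, List, Optional
--
-- PARAMETER_VERSIONS = {
--     'v1': [
--         'min_confidence',
--         'min_volume',
--         'min_trend',
--         'min_adx',
--         'min_roc',
--         'atr_min',
--         'atr_max'
--     ],
--     # Future versions - add new params at end, never reorder v1
--     'v2': [
--         'min_confidence',
--         'min_volume',
--         'min_trend',
--         'min_adx',
--         'min_roc',
--         'atr_min',
--         'atr_max',
--         # New params for v2 would go here
--         # 'rsi_threshold',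
--         # 'macd_threshold',
--     ],
-- }
--
-- CURRENT_VERSION = 'v1'
--
-- def get_parameter_version(params: Dict) -> str:
--     """
--     Determine which version a parameter set uses
--
--     Args:
--         params: Strategy parameters
--
--     Returns:
--         Version string (e.g., 'v1', 'v2')
--     """
--     param_keys = set(params.keys())
--
--     # First: Check for exact matches (most specific)
--     for version in sorted(PARAMETER_VERSIONS.keys(), reverse=True):
--         version_params = set(PARAMETER_VERSIONS[version])
--         if param_keys == version_params:
--             return version
--
--     # Second: Check if params is subset of any version (compatibility mode)
--     for version in sorted(PARAMETER_VERSIONS.keys(), reverse=True):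
--         version_params = set(PARAMETER_VERSIONS[version])
--         if param_keys.issubset(version_params):
--             return version
--
--     # Default to current version
--     return CURRENT_VERSION
-- ===== SOURCE B (Python) =====
-- PARAMETER_VERSIONS = {
--     'v1': [
--         'min_confidence',
--         'min_volume',
--         'min_trend',
--         'min_adx',
--         'min_roc',
--         'atr_min',
--         'atr_max'
--     ],
--     'v2': [
--         'min_confidence',
--         'min_volume',
--         'min_trend',
--         'min_adx',
--         'min_roc',
--         'atr_min',
--         'atr_max',
--     ],
-- }
--
-- CURRENT_VERSION = 'v1'
--
-- def get_parameter_version(params):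
--     """Argmax formulation: score every version (2 exact, 1 superset, 0 otherwise)
--     and take the best-scoring version, breaking ties by the version string itself;
--     fall back to CURRENT_VERSION only when no version scores above 0."""
--     param_keys = set(params.keys())
--
--     def match_level(version):
--         version_params = set(PARAMETER_VERSIONS[version])
--         if param_keys == version_params:
--             return 2
--         if param_keys.issubset(version_params):
--             return 1
--         return 0
--
--     best = max(PARAMETER_VERSIONS, key=lambda v: (match_level(v), v))
--     return best if match_level(best) > 0 else CURRENT_VERSION
-- ===== Notes on version B (the rewrite author's own statement) =====
-- stated objective: alternative
-- what changed: Replaced A's sort-then-two-early-return-scans with an argmax formulation: each version is scored (2 exact match, 1 superset, 0 otherwise) and a single max over the unsorted version keys with the tuple key (score, version) selects the answer, falling back to CURRENT_VERSION only when the best score is 0.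
import Mathlib
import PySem

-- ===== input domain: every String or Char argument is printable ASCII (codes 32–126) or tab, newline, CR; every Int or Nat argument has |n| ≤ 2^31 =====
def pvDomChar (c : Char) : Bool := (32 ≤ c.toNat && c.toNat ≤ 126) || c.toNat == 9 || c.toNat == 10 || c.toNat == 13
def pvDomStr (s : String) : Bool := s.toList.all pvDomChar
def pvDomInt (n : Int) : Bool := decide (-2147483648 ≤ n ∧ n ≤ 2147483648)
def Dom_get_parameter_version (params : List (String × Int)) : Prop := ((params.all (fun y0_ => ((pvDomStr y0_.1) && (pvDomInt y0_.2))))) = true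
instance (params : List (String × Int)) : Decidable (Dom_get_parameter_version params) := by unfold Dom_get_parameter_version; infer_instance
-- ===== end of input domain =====

-- B replaces A's sort-then-two-early-return-scans with a single argmax over scored versions (2 exact, 1 superset, 0 else; tie-break by version string); alternative decomposition, same cost.


-- ===== PORT A =====
-- module constants (literal transliteration of the module dict / constant)
def PARAMETER_VERSIONS : PySem.Dict String (List String) := PySem.Dict.mk
  [("v1", ["min_confidence", "min_volume", "min_trend", "min_adx", "min_roc", "atr_min", "atr_max"]),
   ("v2", ["min_confidence", "min_volume", "min_trend", "min_adx", "min_roc", "atr_min", "atr_max"])]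

def CURRENT_VERSION : String := "v1"

-- A: two early-return loops over the reverse-sorted versions; a 'for … return' is ported as find?
def get_parameter_version (params : List (String × Int)) : String :=
  let param_keys : PySem.Set String := PySem.Set.ofList (params.map Prod.fst)
  match (PySem.List.sorted (PySem.Dict.keys PARAMETER_VERSIONS) (fun x => x) true).find?
      (fun version => PySem.Set.equal param_keys (PySem.Set.ofList (PySem.Dict.getD PARAMETER_VERSIONS version []))) with
  | some version => version
  | none =>
    match (PySem.List.sorted (PySem.Dict.keys PARAMETER_VERSIONS) (fun x => x) true).find?
        (fun version => PySem.Set.issubset param_keys (PySem.Set.ofList (PySem.Dict.getD PARAMETER_VERSIONS version []))) with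
    | some version => version
    | none => CURRENT_VERSION

-- ===== PORT B =====
-- B's helper: the scoring function match_level
def pvMatchLevel (param_keys : PySem.Set String) (version : String) : Int :=
  let version_params := PySem.Set.ofList (PySem.Dict.getD PARAMETER_VERSIONS version [])
  if PySem.Set.equal param_keys version_params then 2
  else if PySem.Set.issubset param_keys version_params then 1
  else 0

-- B: one max over the (unsorted) version keys with tuple key (match_level v, v)
def get_parameter_version_alt (params : List (String × Int)) : String :=
  let param_keys : PySem.Set String := PySem.Set.ofList (params.map Prod.fst)
  match PySem.List.max2? (PySem.Dict.keys PARAMETER_VERSIONS)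
      (fun v => pvMatchLevel param_keys v) (fun v => v) with
  | some best => if pvMatchLevel param_keys best > 0 then best else CURRENT_VERSION
  | none => CURRENT_VERSION  -- unreachable: the literal key list is nonempty (Python max would raise on empty)

-- ===== PRECONDITION & SPEC =====
def Spec_get_parameter_version (params : List (String × Int)) (out : String) : Prop := out = get_parameter_version_alt params
instance (params : List (String × Int)) (out : String) : Decidable (Spec_get_parameter_version params out) := by unfold Spec_get_parameter_version; infer_instance

-- ===== CLAIM (what is proved, stated in full; the proofs are below) =====
def Claim_equal_get_parameter_version : Prop := ∀ (params : List (String × Int)), Dom_get_parameter_version params → Spec_get_parameter_version params (get_parameter_version params)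

-- ===== LEMMAS AND PROOFS =====

-- the concrete reverse-sorted version list A computes
theorem sortedVersions_eq :
    PySem.List.sorted (PySem.Dict.keys PARAMETER_VERSIONS) (fun x => x) true = ["v2", "v1"] := by
  have h : PySem.Dict.keys PARAMETER_VERSIONS = ["v1", "v2"] := by
    simp [PARAMETER_VERSIONS, PySem.Dict.keys_mk]
  rw [h]
  apply PySem.List.sorted_rev_eq_of_perm_of_pairwise_gt
  · exact List.Perm.swap _ _ _
  · simp
    decide

theorem getD_v1 :
    PySem.Dict.getD PARAMETER_VERSIONS "v1" [] =
      ["min_confidence", "min_volume", "min_trend", "min_adx", "min_roc", "atr_min", "atr_max"] := by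
  decide

theorem getD_v2 :
    PySem.Dict.getD PARAMETER_VERSIONS "v2" [] =
      ["min_confidence", "min_volume", "min_trend", "min_adx", "min_roc", "atr_min", "atr_max"] := by
  decide

theorem keys_eq : PySem.Dict.keys PARAMETER_VERSIONS = ["v1", "v2"] := by
  simp [PARAMETER_VERSIONS, PySem.Dict.keys_mk]

-- ===== VERDICT (by name: the statement is the Claim_ definition above) =====
theorem get_parameter_version_spec : Claim_equal_get_parameter_version := by
  intro params _
  unfold Spec_get_parameter_version get_parameter_version get_parameter_version_alt pvMatchLevel
  rw [sortedVersions_eq, keys_eq]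
  simp only [List.find?, PySem.List.max2?, List.foldl, getD_v1, getD_v2]
  cases he : PySem.Set.equal (PySem.Set.ofList (params.map Prod.fst))
      (PySem.Set.ofList
        ["min_confidence", "min_volume", "min_trend", "min_adx", "min_roc", "atr_min", "atr_max"]) <;>
    cases hs : PySem.Set.issubset (PySem.Set.ofList (params.map Prod.fst))
      (PySem.Set.ofList
        ["min_confidence", "min_volume", "min_trend", "min_adx", "min_roc", "atr_min", "atr_max"]) <;>
    simp only [he, hs, Bool.false_eq_true] <;>
    norm_num <;>
    rw [if_pos (show "v1".toList < "v2".toList by decide)] <;>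
    simp [getD_v2, he, hs]
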